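-- pv_equiv track=rewrite | github.com/QianruiLiu/Fragmentomics-subtyping | scripts/getFeatures_snakemake/scripts/merge_griff_with_final.py | strip_common_suffixes
-- ===== SOURCE A (Python) =====
-- _COMMON_SUFFIXES = [
--     ".tsv", ".csv", ".txt",
--     ".bam", ".cram", ".bw", ".bed",
--     ".gz",
--     "_recal", ".recal",
--     "_filtered", ".filtered",
--     "_dedup", ".dedup"
-- ]
--
-- def strip_common_suffixes(s: str) -> str:
--     out = s
--     changed = True
--     while changed:
--         changed = False
--         for suf in _COMMON_SUFFIXES:
--             if out.endswith(suf):
--                 out = out[: -len(suf)]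
--                 changed = True
--     return out
-- ===== SOURCE B (Python) =====
-- _COMMON_SUFFIXES = [
--     ".tsv", ".csv", ".txt",
--     ".bam", ".cram", ".bw", ".bed",
--     ".gz",
--     "_recal", ".recal",
--     "_filtered", ".filtered",
--     "_dedup", ".dedup"
-- ]
--
--
-- def strip_common_suffixes(s: str) -> str:
--     # Since no listed suffix is a suffix of another, at most one can match the
--     # end of s at any time: stripping the first match and restarting reaches
--     # the same fixed point as any repeated-rescan loop.
--     while True:
--         suf = next((x for x in _COMMON_SUFFIXES if s.endswith(x)), None)
--         if suf is None:
--             return s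
--         s = s[: -len(suf)]
-- ===== Notes on version B (the rewrite author's own statement) =====
-- stated objective: simpler
-- what changed: Replaces the outer while-loop with a boolean flag, which rescans the whole suffix list until a full pass strips nothing, by a loop that strips the first matching suffix and restarts with an early return; correctness of the restart relies on no listed suffix being a suffix of another, so the strip sequence is unique.
import Mathlib
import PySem

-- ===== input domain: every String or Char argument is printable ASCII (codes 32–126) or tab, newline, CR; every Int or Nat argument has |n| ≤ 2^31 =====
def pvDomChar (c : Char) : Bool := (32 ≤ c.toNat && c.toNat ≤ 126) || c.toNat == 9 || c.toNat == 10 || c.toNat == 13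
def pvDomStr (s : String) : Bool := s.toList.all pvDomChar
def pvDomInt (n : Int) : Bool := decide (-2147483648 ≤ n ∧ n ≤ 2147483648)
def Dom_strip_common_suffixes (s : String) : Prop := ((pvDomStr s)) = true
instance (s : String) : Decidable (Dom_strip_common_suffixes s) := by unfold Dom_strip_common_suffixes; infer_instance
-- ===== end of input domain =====

-- B replaces A's outer while-loop with a 'changed' flag by a direct recursion that
-- strips the first matching suffix and restarts (simpler decomposition, same cost).


-- the module constant _COMMON_SUFFIXES (shared context of both programs)
def pvSufs : List (List Char) :=
  [".tsv".toList, ".csv".toList, ".txt".toList,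
   ".bam".toList, ".cram".toList, ".bw".toList, ".bed".toList,
   ".gz".toList,
   "_recal".toList, ".recal".toList,
   "_filtered".toList, ".filtered".toList,
   "_dedup".toList, ".dedup".toList]

-- ===== PORT A =====
-- one step of A's inner 'for suf in _COMMON_SUFFIXES' loop, state = (out, changed)
def pvPassA (st : List Char × Bool) (suf : List Char) : List Char × Bool :=
  if PySem.Chars.endswith st.1 suf then
    (PySem.List.slice st.1 none (some (-(suf.length : Int))), true)
  else st

-- every listed suffix is nonempty (used only for termination of the loops)
theorem pvSufs_ne_nil : ∀ x ∈ pvSufs, x ≠ [] := by decide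

-- stripping a nonempty suffix strictly shortens the string (termination measure)
theorem pv_strip_lt (u suf : List Char) (hs : suf <:+ u) (hne : suf ≠ []) :
    (PySem.List.slice u none (some (-(suf.length : Int)))).length < u.length := by
  have hk : 0 < suf.length := List.length_pos_iff.mpr hne
  rw [PySem.List.slice_to_neg_natCast u suf.length hk]
  have hle : suf.length ≤ u.length := hs.length_le
  simp only [List.length_take]
  omega

-- A's inner pass can only shorten 'out'; if the flag comes out true from a false start,
-- it strictly shortened it (termination of A's outer 'while changed' loop)
theorem pvPassA_fold_len : ∀ (sl : List (List Char)), (∀ x ∈ sl, x ≠ []) →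
    ∀ (u : List Char) (c : Bool),
    (sl.foldl pvPassA (u, c)).1.length ≤ u.length ∧
      ((sl.foldl pvPassA (u, c)).2 = true → c = true ∨ (sl.foldl pvPassA (u, c)).1.length < u.length) := by
  intro sl
  induction sl with
  | nil => intro _ u c; simp
  | cons suf sl ih =>
    intro hne u c
    have hmem : ∀ x ∈ sl, x ≠ [] := fun x hx => hne x (List.mem_cons_of_mem _ hx)
    simp only [List.foldl_cons]
    by_cases h : PySem.Chars.endswith u suf = true
    · have hsuf : suf <:+ u := (PySem.Chars.endswith_iff u suf).mp h
      have hlt := pv_strip_lt u suf hsuf (hne suf (List.mem_cons_self))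
      have := ih hmem (PySem.List.slice u none (some (-(suf.length : Int)))) true
      simp only [pvPassA, h, if_true]
      exact ⟨le_trans this.1 (le_of_lt hlt), fun _ => Or.inr (lt_of_le_of_lt this.1 hlt)⟩
    · simp only [pvPassA, h, if_false, Bool.false_eq_true]
      exact ih hmem u c

theorem pvPassA_fold_term (u : List Char)
    (h : (pvSufs.foldl pvPassA (u, false)).2 = true) :
    (pvSufs.foldl pvPassA (u, false)).1.length < u.length := by
  rcases (pvPassA_fold_len pvSufs pvSufs_ne_nil u false).2 h with h' | h'
  · exact absurd h' (by simp)
  · exact h'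

-- A's outer 'while changed' loop
def pvLoopA (out : List Char) : List Char :=
  if _h : (pvSufs.foldl pvPassA (out, false)).2 = true then
    pvLoopA (pvSufs.foldl pvPassA (out, false)).1
  else (pvSufs.foldl pvPassA (out, false)).1
termination_by out.length
decreasing_by exact pvPassA_fold_term out _h

def strip_common_suffixes (s : String) : String := String.ofList (pvLoopA s.toList)

-- ===== PORT B =====
-- B: loop stripping the first matching suffix (tail recursion = the while loop on s); return s when none matches
def pvStripB (l : List Char) : List Char :=
  match hf : pvSufs.find? (fun suf => PySem.Chars.endswith l suf) with
  | some suf => pvStripB (PySem.List.slice l none (some (-(suf.length : Int))))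
  | none => l
termination_by l.length
decreasing_by
  exact pv_strip_lt l suf ((PySem.Chars.endswith_iff l suf).mp (List.find?_some hf))
    (pvSufs_ne_nil suf (List.mem_of_find?_eq_some hf))

def strip_common_suffixes_alt (s : String) : String := String.ofList (pvStripB s.toList)

-- ===== PRECONDITION & SPEC =====
def Spec_strip_common_suffixes (s : String) (out : String) : Prop := out = strip_common_suffixes_alt s
instance (s : String) (out : String) : Decidable (Spec_strip_common_suffixes s out) := by unfold Spec_strip_common_suffixes; infer_instance

-- ===== CLAIM (what is proved, stated in full; the proofs are below) =====
def Claim_equal_strip_common_suffixes : Prop := ∀ (s : String), Dom_strip_common_suffixes s → Spec_strip_common_suffixes s (strip_common_suffixes s)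

-- ===== LEMMAS AND PROOFS =====

-- no listed suffix is a (list-)suffix of a different listed suffix
theorem pvSufs_pairwise : ∀ a ∈ pvSufs, ∀ b ∈ pvSufs, a <:+ b → a = b := by decide

-- hence at most one listed suffix can match the end of any string
theorem pv_unique (l a b : List Char) (ha : a ∈ pvSufs) (hb : b ∈ pvSufs)
    (hsa : a <:+ l) (hsb : b <:+ l) : a = b := by
  rcases le_total a.length b.length with h | h
  · exact pvSufs_pairwise a ha b hb (List.suffix_of_suffix_length_le hsa hsb h)
  · exact (pvSufs_pairwise b hb a ha (List.suffix_of_suffix_length_le hsb hsa h)).symm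

-- stripping any matching listed suffix is one step of B
theorem pvStripB_step (l suf : List Char) (hmem : suf ∈ pvSufs) (hsuf : suf <:+ l) :
    pvStripB l = pvStripB (PySem.List.slice l none (some (-(suf.length : Int)))) := by
  rw [pvStripB.eq_def]
  split
  · next a hf =>
      have ha : a = suf :=
        pv_unique l a suf (List.mem_of_find?_eq_some hf)
          hmem ((PySem.Chars.endswith_iff l a).mp (List.find?_some hf)) hsuf
      rw [ha]
  · next hf =>
      exact absurd ((PySem.Chars.endswith_iff l suf).mpr hsuf)
        (List.find?_eq_none.mp hf suf hmem)

-- A's inner pass does not change the fixed point B computes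
theorem pvStripB_fold : ∀ (sl : List (List Char)), (∀ x ∈ sl, x ∈ pvSufs) →
    ∀ (u : List Char) (c : Bool),
    pvStripB ((sl.foldl pvPassA (u, c)).1) = pvStripB u := by
  intro sl
  induction sl with
  | nil => intro _ u c; rfl
  | cons suf sl ih =>
    intro hmem u c
    simp only [List.foldl_cons]
    by_cases h : PySem.Chars.endswith u suf = true
    · have hsuf : suf <:+ u := (PySem.Chars.endswith_iff u suf).mp h
      simp only [pvPassA, h, if_true]
      rw [ih (fun x hx => hmem x (List.mem_cons_of_mem _ hx)) _ true,
        ← pvStripB_step u suf (hmem suf (List.mem_cons_self)) hsuf]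
    · simp only [pvPassA, h, if_false, Bool.false_eq_true]
      exact ih (fun x hx => hmem x (List.mem_cons_of_mem _ hx)) u c

-- A's 'changed' flag is never reset within a pass
theorem flag_stays_true : ∀ (sl : List (List Char)) (u : List Char),
    (sl.foldl pvPassA (u, true)).2 = true := by
  intro sl
  induction sl with
  | nil => intro u; rfl
  | cons suf sl ih =>
    intro u
    simp only [List.foldl_cons]
    by_cases h : PySem.Chars.endswith u suf = true
    · simp only [pvPassA, h, if_true]; exact ih _
    · simp only [pvPassA, h, if_false, Bool.false_eq_true]; exact ih u

-- if A's pass reports no change, nothing was stripped and nothing matches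
theorem pvPassA_fold_false : ∀ (sl : List (List Char)) (u : List Char) (c : Bool),
    (sl.foldl pvPassA (u, c)).2 = false →
    (sl.foldl pvPassA (u, c)).1 = u ∧ ∀ suf ∈ sl, PySem.Chars.endswith u suf = false := by
  intro sl
  induction sl with
  | nil => intro u c _; simp
  | cons suf sl ih =>
    intro u c hfl
    simp only [List.foldl_cons] at hfl ⊢
    by_cases h : PySem.Chars.endswith u suf = true
    · exfalso
      simp only [pvPassA, h, if_true] at hfl
      have hflag := flag_stays_true sl (PySem.List.slice u none (some (-(suf.length : Int))))
      simp only [hflag] at hfl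
      exact Bool.noConfusion hfl
    · simp only [pvPassA, h, if_false, Bool.false_eq_true] at hfl ⊢
      rcases ih u c hfl with ⟨h1, h2⟩
      refine ⟨h1, fun x hx => ?_⟩
      rcases List.mem_cons.mp hx with rfl | hx'
      · exact Bool.not_eq_true _ |>.mp h
      · exact h2 x hx'

-- A's main loop equals B, by strong induction on the length
theorem pv_main : ∀ (n : Nat) (l : List Char), l.length < n → pvLoopA l = pvStripB l := by
  intro n
  induction n with
  | zero => intro l h; omega
  | succ n ih =>
    intro l hl
    rw [pvLoopA.eq_def]
    by_cases hr : (pvSufs.foldl pvPassA (l, false)).2 = true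
    · have hlt := pvPassA_fold_term l hr
      have hih := ih (pvSufs.foldl pvPassA (l, false)).1 (by omega)
      rw [dif_pos hr, hih]
      exact pvStripB_fold pvSufs (fun x hx => hx) l false
    · rw [dif_neg hr]
      rcases pvPassA_fold_false pvSufs l false (Bool.not_eq_true _ |>.mp hr) with ⟨h1, h2⟩
      rw [h1, pvStripB.eq_def]
      split
      · next a hf =>
          exact absurd (List.find?_some hf) (by simp [h2 a (List.mem_of_find?_eq_some hf)])
      · rfl

-- ===== VERDICT (by name: the statement is the Claim_ definition above) =====
theorem strip_common_suffixes_spec : Claim_equal_strip_common_suffixes := by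
  intro s _
  unfold Spec_strip_common_suffixes strip_common_suffixes strip_common_suffixes_alt
  rw [pv_main (s.toList.length + 1) s.toList (by omega)]
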